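-- pv_equiv track=rewrite | github.com/Mfgloger/overload | overload/wc2sierra/source_parsers.py | parse_BPL_order_export
-- ===== SOURCE A (Python) =====
-- def find_order_field(fields, field_position, order_sequence):
--     """applies only to BPL order export"""
--     try:
--         return fields[field_position].split("^")[order_sequence]
--     except IndexError:
--         return ""
--
-- def parse_BPL_order_export(ords_data):
--     ords_organized = []
--     ordlen = len(ords_data[0].split("^")) + 1
--     for o in range(ordlen):
--         oid = find_order_field(ords_data, 0, o)
--         status = find_order_field(ords_data, 9, o)
--         if not oid or status in ("1", "z"):
--             # return empty if order data is empy string or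
--             # order status indicates its cancelled or on hold
--             break
--         else:
--             ord_dict = dict(
--                 oid=oid,
--                 venNote=find_order_field(ords_data, 1, o),
--                 note=find_order_field(ords_data, 2, o),
--                 intNote=find_order_field(ords_data, 3, o),
--                 code2=find_order_field(ords_data, 4, o),
--                 code4=find_order_field(ords_data, 5, o),
--                 locs=ords_data[6],  # BPL export combines locations :(
--                 oFormat=find_order_field(ords_data, 7, o),
--                 vendor=find_order_field(ords_data, 8, o),
--             )
--             ords_organized.append(ord_dict)
--     return ords_organized
-- ===== SOURCE B (Python) =====
-- def parse_BPL_order_export(ords_data):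
--     # Two staged passes instead of one loop with a break: first count the valid
--     # leading orders scanning only the id and status columns, then build the
--     # whole result in a single comprehension over that prefix.
--     def col(i):
--         return ords_data[i].split("^") if i < len(ords_data) else []
--
--     oids, statuses = col(0), col(9)
--     n = 0
--     while n < len(oids) + 1:
--         oid = oids[n] if n < len(oids) else ""
--         status = statuses[n] if n < len(statuses) else ""
--         if not oid or status in ("1", "z"):
--             break
--         n += 1
--     if n == 0:
--         return []
--     locs = ords_data[6]  # BPL export combines locations
--     ven, note, intn, c2, c4, fmt, vend = (col(i) for i in (1, 2, 3, 4, 5, 7, 8))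
--     g = lambda c, o: c[o] if o < len(c) else ""
--     return [{"oid": oids[o], "venNote": g(ven, o), "note": g(note, o),
--              "intNote": g(intn, o), "code2": g(c2, o), "code4": g(c4, o),
--              "locs": locs, "oFormat": g(fmt, o), "vendor": g(vend, o)}
--             for o in range(n)]
-- ===== Notes on version B (the rewrite author's own statement) =====
-- stated objective: alternative
-- what changed: B is two staged passes instead of A's single break-loop of per-field re-splits: a first scan of only the id/status columns computes the count n of valid leading orders, then one comprehension over range(n) builds all dicts from columns split once.
import Mathlib
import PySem

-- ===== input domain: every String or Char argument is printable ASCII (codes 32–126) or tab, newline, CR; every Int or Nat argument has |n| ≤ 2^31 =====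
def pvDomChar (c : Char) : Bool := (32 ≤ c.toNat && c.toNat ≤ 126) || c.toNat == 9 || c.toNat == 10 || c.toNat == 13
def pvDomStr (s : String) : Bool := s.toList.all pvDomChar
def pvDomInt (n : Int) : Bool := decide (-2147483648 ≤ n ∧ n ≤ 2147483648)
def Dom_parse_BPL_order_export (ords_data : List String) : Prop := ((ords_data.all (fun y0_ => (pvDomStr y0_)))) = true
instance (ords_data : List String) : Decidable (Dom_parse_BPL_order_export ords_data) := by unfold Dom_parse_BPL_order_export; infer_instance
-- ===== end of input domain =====

-- ===== PORT A =====
-- B replaces A's single break-loop of per-field re-splits by two staged passes: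
-- count the valid orders from the id/status columns, then build the result in
-- one map over that prefix. Proved: A = B on Pre_ (the inputs where A returns).

-- s.split("^") ; the separator is the non-empty literal "^", so split? is always `some`
def splitCaret (s : String) : List String :=
  (PySem.Str.split? s "^").getD []

-- fields[field_position].split("^")[order_sequence] with IndexError caught -> ""
def find_order_field (fields : List String) (field_position order_sequence : Int) : String :=
  match PySem.List.pyGet? fields field_position with
  | none => ""
  | some f =>
    match PySem.List.pyGet? (splitCaret f) order_sequence with
    | none => ""
    | some v => v

-- the `for o in range(ordlen)` loop with its `break`
def parseLoopA (ords_data : List String) :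
    List Int → List (List (String × String)) → List (List (String × String))
  | [], acc => acc
  | o :: os, acc =>
    let oid := find_order_field ords_data 0 o
    let status := find_order_field ords_data 9 o
    if oid = "" ∨ status = "1" ∨ status = "z" then acc
    else
      parseLoopA ords_data os (acc ++
        [[("oid", oid),
          ("venNote", find_order_field ords_data 1 o),
          ("note", find_order_field ords_data 2 o),
          ("intNote", find_order_field ords_data 3 o),
          ("code2", find_order_field ords_data 4 o),
          ("code4", find_order_field ords_data 5 o),
          -- ords_data[6]: raises IndexError when len < 7; Pre_ keeps that reachable
          -- case out, so the total default "" is never observed inside Pre_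
          ("locs", PySem.List.pyGetD ords_data 6 ""),
          ("oFormat", find_order_field ords_data 7 o),
          ("vendor", find_order_field ords_data 8 o)]])

def parse_BPL_order_export (ords_data : List String) : List (List (String × String)) :=
  match PySem.List.pyGet? ords_data 0 with
  | none => []   -- Python raises IndexError here (ords_data = []); excluded by Pre_
  | some first =>
    let ordlen : Nat := (splitCaret first).length + 1
    parseLoopA ords_data (PySem.List.pyRange 0 (ordlen : Int) 1) []

-- ===== PORT B =====
-- ords_data[i].split("^") if i < len(ords_data) else []
def colB (ords_data : List String) (i : Nat) : List String :=
  if h : i < ords_data.length then splitCaret ords_data[i] else []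

-- the counting `while` loop of B: walks candidate indices, stops at the first
-- empty id or cancelled/held status, returns the count of valid leading orders
def countLoopB (oids statuses : List String) : List Nat → Nat
  | [] => 0
  | o :: os =>
    -- oid = oids[o] if in range else ""; status likewise
    if oids.getD o "" = "" ∨ statuses.getD o "" = "1" ∨ statuses.getD o "" = "z" then 0
    else countLoopB oids statuses os + 1

def parse_BPL_order_export_alt (ords_data : List String) : List (List (String × String)) :=
  let oids := colB ords_data 0
  let statuses := colB ords_data 9
  let n := countLoopB oids statuses (List.range (oids.length + 1))
  if n = 0 then []
  else
    -- ords_data[6]: in Python raises IndexError when len < 7 (n ≥ 1 here);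
    -- excluded by Pre_, so the total default "" is never observed inside Pre_
    let locs := ords_data.getD 6 ""
    let ven := colB ords_data 1
    let note := colB ords_data 2
    let intn := colB ords_data 3
    let c2 := colB ords_data 4
    let c4 := colB ords_data 5
    let fmt := colB ords_data 7
    let vend := colB ords_data 8
    (List.range n).map (fun o =>
      -- oids[o]: o < n ≤ len(oids), so getD equals Python's direct index here
      [("oid", oids.getD o ""),
       ("venNote", ven.getD o ""),
       ("note", note.getD o ""),
       ("intNote", intn.getD o ""),
       ("code2", c2.getD o ""),
       ("code4", c4.getD o ""),
       ("locs", locs),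
       ("oFormat", fmt.getD o ""),
       ("vendor", vend.getD o "")])

-- ===== PRECONDITION & SPEC =====
-- Pre_ = exactly the inputs where A returns: ords_data nonempty, and either at
-- least 7 fields (so ords_data[6] exists) or the first order id is "" (head empty
-- or starting with '^'), so the loop breaks before ever touching ords_data[6]
-- (with fewer than 7 fields the status column is missing, so the status test
-- cannot cause the first break).
def Pre_parse_BPL_order_export (ords_data : List String) : Prop :=
  ords_data ≠ [] ∧
    (7 ≤ ords_data.length ∨ ords_data.headD "" = "" ∨
      (ords_data.headD "").toList.head? = some '^')
instance (ords_data : List String) : Decidable (Pre_parse_BPL_order_export ords_data) := by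
  unfold Pre_parse_BPL_order_export; infer_instance

def pvWitness_parse_BPL_order_export : List String :=
  ["a^b", "v1^v2", "n1", "i1", "c2", "c4", "LOC", "f1^f2", "vd1^vd2", "0^0"]

def Spec_parse_BPL_order_export (ords_data : List String) (out : List (List (String × String))) : Prop := out = parse_BPL_order_export_alt ords_data
instance (ords_data : List String) (out : List (List (String × String))) : Decidable (Spec_parse_BPL_order_export ords_data out) := by unfold Spec_parse_BPL_order_export; infer_instance

-- ===== CLAIM (what is proved, stated in full; the proofs are below) =====
def Claim_equal_parse_BPL_order_export : Prop := ∀ (ords_data : List String), Dom_parse_BPL_order_export ords_data → Pre_parse_BPL_order_export ords_data → Spec_parse_BPL_order_export ords_data (parse_BPL_order_export ords_data)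

-- ===== LEMMAS AND PROOFS =====

-- the row B's comprehension builds at index o
def mkRow (ords : List String) (o : Nat) : List (String × String) :=
  [("oid", (colB ords 0).getD o ""),
   ("venNote", (colB ords 1).getD o ""),
   ("note", (colB ords 2).getD o ""),
   ("intNote", (colB ords 3).getD o ""),
   ("code2", (colB ords 4).getD o ""),
   ("code4", (colB ords 5).getD o ""),
   ("locs", ords.getD 6 ""),
   ("oFormat", (colB ords 7).getD o ""),
   ("vendor", (colB ords 8).getD o "")]

-- pointwise bridge: A's per-field lookup = B's table lookup
theorem ff_eq_colB (ords : List String) (i k : Nat) :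
    find_order_field ords (Int.ofNat i) (Int.ofNat k) = (colB ords i).getD k "" := by
  unfold find_order_field colB
  rw [show (Int.ofNat i) = ((i : Nat) : Int) from rfl, PySem.List.pyGet?_natCast]
  by_cases h : i < ords.length
  · rw [List.getElem?_eq_getElem h]
    simp only [dif_pos h]
    rw [show (Int.ofNat k) = ((k : Nat) : Int) from rfl, PySem.List.pyGet?_natCast,
      List.getD_eq_getElem?_getD]
    cases (splitCaret ords[i])[k]? <;> rfl
  · rw [List.getElem?_eq_none (by omega)]
    simp [h]

theorem count_le (oids statuses : List String) :
    ∀ ks : List Nat, countLoopB oids statuses ks ≤ ks.length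
  | [] => by simp [countLoopB]
  | k :: ks => by
    unfold countLoopB
    split_ifs
    · simp
    · have := count_le oids statuses ks
      simp; omega

-- A's breaking loop = take the counted prefix, mapped to rows
theorem loopA_eq_take (ords : List String) :
    ∀ (ks : List Nat) (acc : List (List (String × String))),
      parseLoopA ords (ks.map Int.ofNat) acc =
        acc ++ (ks.take (countLoopB (colB ords 0) (colB ords 9) ks)).map (mkRow ords)
  | [], acc => by simp [parseLoopA, countLoopB]
  | k :: ks, acc => by
    have e0 : find_order_field ords 0 (Int.ofNat k) = (colB ords 0).getD k "" := ff_eq_colB ords 0 k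
    have e1 : find_order_field ords 1 (Int.ofNat k) = (colB ords 1).getD k "" := ff_eq_colB ords 1 k
    have e2 : find_order_field ords 2 (Int.ofNat k) = (colB ords 2).getD k "" := ff_eq_colB ords 2 k
    have e3 : find_order_field ords 3 (Int.ofNat k) = (colB ords 3).getD k "" := ff_eq_colB ords 3 k
    have e4 : find_order_field ords 4 (Int.ofNat k) = (colB ords 4).getD k "" := ff_eq_colB ords 4 k
    have e5 : find_order_field ords 5 (Int.ofNat k) = (colB ords 5).getD k "" := ff_eq_colB ords 5 k
    have e7 : find_order_field ords 7 (Int.ofNat k) = (colB ords 7).getD k "" := ff_eq_colB ords 7 k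
    have e8 : find_order_field ords 8 (Int.ofNat k) = (colB ords 8).getD k "" := ff_eq_colB ords 8 k
    have e9 : find_order_field ords 9 (Int.ofNat k) = (colB ords 9).getD k "" := ff_eq_colB ords 9 k
    rw [List.map_cons]
    unfold parseLoopA countLoopB
    simp only [e0, e1, e2, e3, e4, e5, e7, e8, e9]
    split_ifs with hbr
    · simp
    · rw [loopA_eq_take ords ks]
      have hloc : PySem.List.pyGetD ords 6 "" = ords.getD 6 "" := by
        simp [PySem.List.pyGetD_ofNat']
      simp [mkRow, hloc, List.append_assoc]

-- ===== VERDICT (by name: the statement is the Claim_ definition above) =====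
theorem parse_BPL_order_export_spec : Claim_equal_parse_BPL_order_export := by
  intro ords hdom hpre
  unfold Spec_parse_BPL_order_export
  cases ords with
  | nil => exact absurd rfl hpre.1
  | cons h t =>
    unfold parse_BPL_order_export parse_BPL_order_export_alt
    simp only [PySem.List.pyGet?_zero_cons, PySem.List.pyRange_zero_natCast]
    have hc0 : colB (h :: t) 0 = splitCaret h := by simp [colB]
    rw [show splitCaret h = colB (h :: t) 0 from hc0.symm]
    rw [show List.map (fun k : Nat => (k : Int)) (List.range ((colB (h :: t) 0).length + 1))
        = (List.range ((colB (h :: t) 0).length + 1)).map Int.ofNat from rfl]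
    rw [loopA_eq_take (h :: t) (List.range ((colB (h :: t) 0).length + 1)) []]
    set n := countLoopB (colB (h :: t) 0) (colB (h :: t) 9)
      (List.range ((colB (h :: t) 0).length + 1)) with hn
    have hle : n ≤ (colB (h :: t) 0).length + 1 := by
      have := count_le (colB (h :: t) 0) (colB (h :: t) 9)
        (List.range ((colB (h :: t) 0).length + 1))
      simpa [hn] using this
    rw [List.take_range, Nat.min_eq_left hle]
    by_cases h0 : n = 0
    · simp [h0]
    · simp only [if_neg h0, List.nil_append]
      rfl
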